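-- pv_equiv track=rewrite | github.com/ritik-sri/LeetCode-Problem-Solution-in-PYTHON | Check if the door is open or closed - GFG/check-if-the-door-is-open-or-closed.py | checkDoorStatus
-- ===== SOURCE A (Python) =====
-- import math
--
-- def checkDoorStatus(N):
--     stats = [0]*N
--     for i in range(1,N+1):
--         s = int(math.sqrt(i))
--         if(s*s==i):
--             stats[i-1]=1
--         else:
--             stats[i-1]=0
--     return stats
-- ===== SOURCE B (Python) =====
-- def checkDoorStatus(N):
--     stats = [0] * N
--     j = 1
--     while j * j <= N:
--         stats[j * j - 1] = 1
--         j += 1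
--     return stats
-- ===== Notes on version B (the rewrite author's own statement) =====
-- stated objective: faster
-- what changed: Instead of testing every i in 1..N for perfect-squareness with int(math.sqrt(i)), B zero-fills the list once and directly marks the sqrt(N) square positions j*j-1 in a short while loop.
import Mathlib
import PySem

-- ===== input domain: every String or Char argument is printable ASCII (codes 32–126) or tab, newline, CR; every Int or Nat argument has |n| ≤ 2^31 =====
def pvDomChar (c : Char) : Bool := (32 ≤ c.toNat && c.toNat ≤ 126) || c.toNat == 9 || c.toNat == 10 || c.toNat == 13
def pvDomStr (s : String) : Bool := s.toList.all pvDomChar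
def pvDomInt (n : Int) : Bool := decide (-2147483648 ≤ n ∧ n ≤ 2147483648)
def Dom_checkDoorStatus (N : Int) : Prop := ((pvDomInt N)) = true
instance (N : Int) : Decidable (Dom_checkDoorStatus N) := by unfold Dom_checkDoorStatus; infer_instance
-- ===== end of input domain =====

-- B replaces A's per-element int(math.sqrt(i)) perfect-square test by a single zero-fill
-- followed by a while loop that marks only the √N square positions.

-- ===== PORT A =====
-- int(math.sqrt(i)) = ⌊√i⌋ exactly for 0 ≤ i ≤ 2^31 (doubles are exact there), ported as Nat.sqrt.
def checkDoorStatus (N : Int) : List Int :=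
  (PySem.List.pyRange 1 (N+1) 1).foldl
    (fun stats i =>
      let s : Int := (Nat.sqrt i.toNat : Int)
      if s * s = i then PySem.List.pySetD stats (i-1) (1 : Int)
      else PySem.List.pySetD stats (i-1) (0 : Int))
    (List.replicate N.toNat 0)

-- ===== PORT B =====
-- the 'while j*j <= N' loop of Source B; terminates because j ≤ N.toNat while the guard holds
def pvFill (N : Int) (j : Nat) (stats : List Int) : List Int :=
  if _h : (j : Int) * (j : Int) ≤ N then
    pvFill N (j+1) (PySem.List.pySetD stats ((j : Int) * (j : Int) - 1) (1 : Int))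
  else stats
termination_by N.toNat + 1 - j
decreasing_by
  have h0 : (0:Int) ≤ (j:Int) * (j:Int) := by positivity
  have hj : (j:Int) ≤ (j:Int) * (j:Int) := by nlinarith [Int.natCast_nonneg j]
  omega

def checkDoorStatus_alt (N : Int) : List Int :=
  pvFill N 1 (List.replicate N.toNat 0)

-- ===== PRECONDITION & SPEC =====
def Spec_checkDoorStatus (N : Int) (out : List Int) : Prop := out = checkDoorStatus_alt N
instance (N : Int) (out : List Int) : Decidable (Spec_checkDoorStatus N out) := by unfold Spec_checkDoorStatus; infer_instance

-- ===== CLAIM (what is proved, stated in full; the proofs are below) =====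
def Claim_equal_checkDoorStatus : Prop := ∀ (N : Int), Dom_checkDoorStatus N → Spec_checkDoorStatus N (checkDoorStatus N)

-- ===== LEMMAS AND PROOFS =====

-- getElem? of a fold that sets index i to f i, over a list of indices
theorem pv_foldl_set_get (f : Nat → Int) (l : List Nat) (stats : List Int) (k : Nat) :
    (l.foldl (fun st i => st.set i (f i)) stats)[k]? =
      if k ∈ l ∧ k < stats.length then some (f k) else stats[k]? := by
  induction l generalizing stats with
  | nil => simp
  | cons i rest ih =>
    simp only [List.foldl_cons, ih, List.length_set, List.getElem?_set, List.mem_cons]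
    by_cases hr : k ∈ rest
    · by_cases hk : k < stats.length <;> simp [hr, hk] <;> omega
    · by_cases hik : i = k
      · subst hik
        by_cases hk : i < stats.length <;> simp [hr, hk]
      · simp [hr, hik, Ne.symm hik]

-- the 0/1 value A stores at index k (for position k+1)
def pvF (k : Nat) : Int := if Nat.sqrt (k+1) * Nat.sqrt (k+1) = k + 1 then 1 else 0

-- A's loop over i = 1..N, rewritten as a fold over the Nat indices k = i-1
theorem pv_A_eq_idx_fold (N : Int) :
    checkDoorStatus N =
      (List.range N.toNat).foldl
        (fun st k => st.set k (pvF k)) (List.replicate N.toNat 0) := by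
  unfold checkDoorStatus
  rw [PySem.List.pyRange_one]
  have hN : (N + 1 - 1) = N := by ring
  rw [hN, List.foldl_map]
  apply PySem.List.foldl_congr_mem
  intro st k hk
  have hk' : k < N.toNat := List.mem_range.mp hk
  have h1 : ((1 : Int) + k).toNat = k + 1 := by omega
  have h3 : ∀ v : Int, PySem.List.pySetD st ((1 : Int) + (k : Int) - 1) v = st.set k v := by
    intro v
    have h2 : ((1 : Int) + (k : Int) - 1) = (k : Int) := by ring
    rw [h2, PySem.List.pySetD_of_nonneg _ _ (by positivity)]
    simp
  by_cases hsq : Nat.sqrt (k+1) * Nat.sqrt (k+1) = k + 1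
  · have key : ((Nat.sqrt ((1:Int) + (k:Int)).toNat : Int)) * (Nat.sqrt ((1:Int) + (k:Int)).toNat : Int)
        = (1:Int) + (k:Int) := by
      rw [h1]
      have hc : ((Nat.sqrt (k+1) * Nat.sqrt (k+1) : Nat) : Int) = ((k+1 : Nat) : Int) := by
        exact_mod_cast congrArg (fun x : Nat => (x : Int)) hsq
      push_cast at hc
      linarith
    rw [if_pos key, h3]
    simp [pvF, hsq]
  · have hne : ((Nat.sqrt ((1:Int) + (k:Int)).toNat : Int)) * (Nat.sqrt ((1:Int) + (k:Int)).toNat : Int)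
        ≠ (1:Int) + (k:Int) := by
      rw [h1]
      intro hc
      apply hsq
      have hcast : ((Nat.sqrt (k+1) * Nat.sqrt (k+1) : Nat) : Int) = ((k+1 : Nat) : Int) := by
        push_cast
        push_cast at hc
        linarith
      exact_mod_cast hcast
    rw [if_neg hne, h3]
    simp [pvF, hsq]

-- B's while loop as a fold over the square roots j = j₀ .. ⌊√N⌋
theorem pv_fill_eq_fold (N : Int) (j : Nat) (hj : 1 ≤ j) (stats : List Int) :
    pvFill N j stats =
      (List.range' j (Nat.sqrt N.toNat + 1 - j)).foldl
        (fun st m => st.set (m*m-1) (1 : Int)) stats := by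
  by_cases h : (j : Int) * (j : Int) ≤ N
  · have hjj : (j : Int) * (j : Int) = ((j*j : Nat) : Int) := by push_cast; ring
    have hle : j * j ≤ N.toNat := by omega
    have hjs : j ≤ Nat.sqrt N.toNat := Nat.le_sqrt.mpr hle
    have hlen : Nat.sqrt N.toNat + 1 - j = (Nat.sqrt N.toNat + 1 - (j+1)) + 1 := by omega
    rw [pvFill, dif_pos h, hlen, List.range'_succ, List.foldl_cons]
    have hset : PySem.List.pySetD stats ((j : Int) * (j : Int) - 1) (1:Int)
        = stats.set (j*j-1) 1 := by
      rw [PySem.List.pySetD_of_nonneg _ _ (by nlinarith [Int.natCast_nonneg j])]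
      congr 1
      omega
    rw [hset]
    exact pv_fill_eq_fold N (j+1) (by omega) _
  · have hz : Nat.sqrt N.toNat + 1 - j = 0 := by
      by_cases hN : 0 ≤ N
      · by_contra hc
        have hjs : j ≤ Nat.sqrt N.toNat := by omega
        have hs2 := Nat.sqrt_le' N.toNat
        have h1 : j * j ≤ N.toNat := by nlinarith
        have h2 : ((j*j : Nat) : Int) ≤ N := by omega
        push_cast at h2
        exact h (by linarith)
      · have hz0 : N.toNat = 0 := by omega
        rw [hz0]
        simp only [Nat.sqrt_zero]
        omega
    rw [pvFill, dif_neg h, hz]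
    rfl
  termination_by N.toNat + 1 - j
  decreasing_by
    have h0 : (0:Int) ≤ (j:Int) * (j:Int) := by positivity
    have hjle : (j:Int) ≤ (j:Int) * (j:Int) := by nlinarith [Int.natCast_nonneg j]
    omega

theorem pv_main (N : Int) : checkDoorStatus N = checkDoorStatus_alt N := by
  rw [pv_A_eq_idx_fold]
  unfold checkDoorStatus_alt
  rw [pv_fill_eq_fold N 1 (le_refl 1)]
  have hr1 : Nat.sqrt N.toNat + 1 - 1 = Nat.sqrt N.toNat := by omega
  rw [hr1]
  have hmap : (List.range' 1 (Nat.sqrt N.toNat)).foldl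
      (fun st m => st.set (m*m-1) (1 : Int)) (List.replicate N.toNat 0)
    = ((List.range' 1 (Nat.sqrt N.toNat)).map (fun m => m*m-1)).foldl
      (fun st k => st.set k ((fun _ => (1:Int)) k)) (List.replicate N.toNat 0) := by
    rw [List.foldl_map]
  rw [hmap]
  apply List.ext_getElem?
  intro k
  rw [pv_foldl_set_get pvF (List.range N.toNat) _ k,
      pv_foldl_set_get (fun _ => (1:Int)) _ _ k]
  by_cases hk : k < N.toNat
  · have c1 : k ∈ List.range N.toNat ∧ k < (List.replicate N.toNat (0:Int)).length := by
      simp [hk]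
    rw [if_pos c1]
    by_cases hsq : Nat.sqrt (k+1) * Nat.sqrt (k+1) = k + 1
    · have hm1 : 1 ≤ Nat.sqrt (k+1) := by
        by_contra hc
        have h0 : Nat.sqrt (k+1) = 0 := by omega
        rw [h0] at hsq
        omega
      have hle : Nat.sqrt (k+1) * Nat.sqrt (k+1) ≤ N.toNat := by rw [hsq]; omega
      have hmem : Nat.sqrt (k+1) ∈ List.range' 1 (Nat.sqrt N.toNat) := by
        rw [List.mem_range'_1]
        exact ⟨hm1, by have := Nat.le_sqrt.mpr hle; omega⟩
      have c2 : k ∈ (List.range' 1 (Nat.sqrt N.toNat)).map (fun m => m*m-1)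
          ∧ k < (List.replicate N.toNat (0:Int)).length := by
        exact ⟨List.mem_map.mpr ⟨Nat.sqrt (k+1), hmem, by omega⟩, by simp [hk]⟩
      rw [if_pos c2]
      simp [pvF, hsq]
    · have c2 : ¬ (k ∈ (List.range' 1 (Nat.sqrt N.toNat)).map (fun m => m*m-1)
          ∧ k < (List.replicate N.toNat (0:Int)).length) := by
        rintro ⟨hmem, -⟩
        rcases List.mem_map.mp hmem with ⟨m, hm, hmk⟩
        rw [List.mem_range'_1] at hm
        apply hsq
        have h1m : 1*1 ≤ m*m := Nat.mul_le_mul hm.1 hm.1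
        have hmm : m * m = k + 1 := by omega
        have hs : Nat.sqrt (m*m) = m := by
          rw [← pow_two m, Nat.sqrt_eq']
        rw [← hmm, hs]
      rw [if_neg c2]
      simp [pvF, hsq, hk]
  · have c1 : ¬ (k ∈ List.range N.toNat ∧ k < (List.replicate N.toNat (0:Int)).length) := by
      rintro ⟨h1', -⟩
      exact hk (List.mem_range.mp h1')
    have c2 : ¬ (k ∈ (List.range' 1 (Nat.sqrt N.toNat)).map (fun m => m*m-1)
        ∧ k < (List.replicate N.toNat (0:Int)).length) := by
      rintro ⟨-, h2'⟩
      simp at h2'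
      omega
    rw [if_neg c1, if_neg c2]

-- ===== VERDICT (by name: the statement is the Claim_ definition above) =====
theorem checkDoorStatus_spec : Claim_equal_checkDoorStatus := by
  intro N _
  unfold Spec_checkDoorStatus
  exact pv_main N
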